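-- pv_equiv track=rewrite | github.com/anhaidgroup/py_entitymatching | magellan/utils/catalog_helper.py | get_name_for_key
-- ===== SOURCE A (Python) =====
-- def get_name_for_key(columns):
--     k = '_id'
--     i = 0
--     # try attribute name of the form "_id", "_id0", "_id1", ... and
--     # return the first available name
--     while True:
--         if k not in columns:
--             break
--         else:
--             k = '_id' + str(i)
--         i += 1
--     return k
-- ===== SOURCE B (Python) =====
-- def _suffix_index(col):
--     """Return j if col == '_id' + str(j) for some integer j >= 0, else None."""
--     if not col.startswith('_id') or len(col) == 3:
--         return None
--     if col[3] == '0':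
--         return 0 if len(col) == 4 else None
--     j = 0
--     for ch in col[3:]:
--         if not ('0' <= ch <= '9'):
--             return None
--         j = 10 * j + (ord(ch) - 48)
--     return j
--
--
-- def get_name_for_key(columns):
--     if '_id' not in columns:
--         return '_id'
--     used = set()
--     for col in columns:
--         j = _suffix_index(col)
--         if j is not None:
--             used.add(j)
--     # walk the sorted used indices to find the smallest free one (mex)
--     m = 0
--     for v in sorted(used):
--         if v == m:
--             m += 1
--         elif v > m:
--             break
--     return '_id' + str(m)
-- ===== Notes on version B (the rewrite author's own statement) =====
-- stated objective: alternative
-- what changed: Instead of A's sequential probing ('_id', '_id0', '_id1', ... each re-scanning the list), B makes one pass over the columns extracting the index j of every name of the exact form '_id'+str(j) into a set, then walks the sorted used indices to find the minimum excludant.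
import Mathlib
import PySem

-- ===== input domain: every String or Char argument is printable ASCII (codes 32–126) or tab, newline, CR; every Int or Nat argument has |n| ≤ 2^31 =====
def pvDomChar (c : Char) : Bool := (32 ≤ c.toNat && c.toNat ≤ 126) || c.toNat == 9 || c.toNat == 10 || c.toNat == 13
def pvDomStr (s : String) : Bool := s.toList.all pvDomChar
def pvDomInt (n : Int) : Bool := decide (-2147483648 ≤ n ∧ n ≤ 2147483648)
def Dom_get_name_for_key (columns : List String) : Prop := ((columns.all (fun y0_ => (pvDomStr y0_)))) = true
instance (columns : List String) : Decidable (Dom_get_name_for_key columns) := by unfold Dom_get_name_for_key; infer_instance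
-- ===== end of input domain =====

-- B replaces A's sequential probing ('_id','_id0','_id1',... each re-scanning the list) by one
-- extraction pass collecting the indices j of names '_id'+str(j) into a set and a sorted mex walk.


-- ===== PORT A =====
-- the Python while-loop; the fuel (columns.length + 2 at the call site) only makes the same
-- computation total: the loop is proved below to return within that many probes
def pvLoopA (columns : List String) : Nat → String → Int → String
  | 0, k, _ => k
  | fuel+1, k, i =>
    if columns.contains k then pvLoopA columns fuel ("_id" ++ PySem.Int.toStr i) (i + 1) else k

def get_name_for_key (columns : List String) : String :=
  pvLoopA columns (columns.length + 2) "_id" 0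

-- ===== PORT B =====
-- the hand-written validating parse loop of Source B's _suffix_index (ported by hand, step for step)
def pvParseDigits : List Char → Int → Option Int
  | [], j => some j
  | ch :: rest, j =>
    if '0' ≤ ch ∧ ch ≤ '9' then pvParseDigits rest (10 * j + ((ch.toNat : Int) - 48)) else none

def pvSuffixIndex? (col : String) : Option Int :=
  if ¬ (PySem.Str.startswith col "_id" = true) ∨ PySem.Str.len col = 3 then none
  else if PySem.Str.pyGet? col 3 = some '0' then
    (if PySem.Str.len col = 4 then some 0 else none)
  else pvParseDigits (PySem.Str.slice col (some 3) none).toList 0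

-- Source B's 'for v in sorted(used)' walk with its early break
def pvMexWalk : List Int → Int → Int
  | [], m => m
  | v :: rest, m => if v = m then pvMexWalk rest (m + 1) else if v > m then m else pvMexWalk rest m

def get_name_for_key_alt (columns : List String) : String :=
  if columns.contains "_id" = false then "_id"
  else
    let used : PySem.Set Int := columns.foldl (fun s col =>
      match pvSuffixIndex? col with
      | some j => PySem.Set.add s j
      | none => s) PySem.Set.empty
    "_id" ++ PySem.Int.toStr (pvMexWalk (PySem.List.sorted used (fun x => x) false) 0)

-- ===== PRECONDITION & SPEC =====
def Spec_get_name_for_key (columns : List String) (out : String) : Prop := out = get_name_for_key_alt columns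
instance (columns : List String) (out : String) : Decidable (Spec_get_name_for_key columns out) := by unfold Spec_get_name_for_key; infer_instance

-- ===== CLAIM (what is proved, stated in full; the proofs are below) =====
def Claim_equal_get_name_for_key : Prop := ∀ (columns : List String), Dom_get_name_for_key columns → Spec_get_name_for_key columns (get_name_for_key columns)

-- ===== LEMMAS AND PROOFS =====

-- the candidate name '_id' + str(j)
def pvKey (j : Nat) : String := "_id" ++ PySem.Int.toStr (j : Int)

-- decimal value of a digit string
def pvVal (cs : List Char) : Nat := cs.foldl (fun a c => 10 * a + (c.toNat - 48)) 0

theorem pv_toDigitsCore_append (f n : Nat) (ds : List Char) :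
    Nat.toDigitsCore 10 f n ds = Nat.toDigitsCore 10 f n [] ++ ds := by
  induction f generalizing n ds with
  | zero => simp [Nat.toDigitsCore]
  | succ f ih =>
    simp only [Nat.toDigitsCore]
    by_cases h : n / 10 = 0
    · simp [h]
    · simp only [h]
      rw [ih (n/10) (_ :: ds), ih (n/10) [_]]
      simp

theorem pv_toDigitsCore_fuel : ∀ (n f g : Nat) (ds : List Char), n < f → n < g →
    Nat.toDigitsCore 10 f n ds = Nat.toDigitsCore 10 g n ds := by
  intro n
  induction n using Nat.strong_induction_on with
  | _ n ih =>
    intro f g ds hf hg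
    cases f with
    | zero => omega
    | succ f =>
      cases g with
      | zero => omega
      | succ g =>
        simp only [Nat.toDigitsCore]
        by_cases h : n / 10 = 0
        · simp [h]
        · have hn : 0 < n := by
            rcases Nat.eq_zero_or_pos n with h0 | h0
            · subst h0; simp at h
            · exact h0
          have hlt : n / 10 < n := Nat.div_lt_self hn (by omega)
          simp only [h]
          exact ih (n/10) hlt f g _ (by omega) (by omega)

theorem pv_toDigits_step (n : Nat) :
    Nat.toDigits 10 n =
      if n < 10 then [Nat.digitChar n] else Nat.toDigits 10 (n / 10) ++ [Nat.digitChar (n % 10)] := by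
  conv_lhs => rw [Nat.toDigits]
  simp only [Nat.toDigitsCore]
  by_cases h : n / 10 = 0
  · have : n < 10 := by omega
    simp [h, this, Nat.mod_eq_of_lt this]
  · have hn10 : 10 ≤ n := by
      by_contra hc
      exact h (Nat.div_eq_of_lt (by omega))
    have hlt : n / 10 < n := Nat.div_lt_self (by omega) (by omega)
    simp only [h, if_neg (by omega : ¬ n < 10)]
    rw [pv_toDigitsCore_append, pv_toDigitsCore_fuel (n/10) n (n/10 + 1) [] (by omega) (by omega)]
    rfl

theorem pv_digitChar_toNat (d : Nat) (h : d < 10) : (Nat.digitChar d).toNat = 48 + d := by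
  interval_cases d <;> decide

theorem pv_digitChar_digit (d : Nat) (h : d < 10) :
    '0' ≤ Nat.digitChar d ∧ Nat.digitChar d ≤ '9' := by
  interval_cases d <;> exact ⟨by decide, by decide⟩

theorem pv_char_toNat_inj (c d : Char) (h : c.toNat = d.toNat) : c = d :=
  Char.ext (UInt32.toNat_inj.mp h)

theorem pv_digit_toNat_range (c : Char) (h1 : '0' ≤ c) (h2 : c ≤ '9') :
    48 ≤ c.toNat ∧ c.toNat ≤ 57 := by
  rw [Char.le_def, UInt32.le_iff_toNat_le] at h1 h2
  exact ⟨h1, h2⟩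

theorem pv_digitChar_of_digit (c : Char) (h1 : '0' ≤ c) (h2 : c ≤ '9') :
    Nat.digitChar (c.toNat - 48) = c := by
  have hr := pv_digit_toNat_range c h1 h2
  apply pv_char_toNat_inj
  rw [pv_digitChar_toNat _ (by omega)]
  omega

theorem pv_toDigits_ne_nil (n : Nat) : Nat.toDigits 10 n ≠ [] := by
  rw [pv_toDigits_step]
  split_ifs <;> simp

theorem pv_toDigits_all_digit (n : Nat) :
    ∀ c ∈ Nat.toDigits 10 n, '0' ≤ c ∧ c ≤ '9' := by
  induction n using Nat.strong_induction_on with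
  | _ n ih =>
    rw [pv_toDigits_step]
    by_cases h : n < 10
    · simpa [h] using pv_digitChar_digit n h
    · have hlt : n / 10 < n := Nat.div_lt_self (by omega) (by omega)
      simp only [if_neg h, List.mem_append, List.mem_singleton]
      rintro c (hc | rfl)
      · exact ih _ hlt c hc
      · exact pv_digitChar_digit _ (Nat.mod_lt _ (by omega))

theorem pv_toDigits_head (n : Nat) (hn : n ≠ 0) :
    ∀ h t, Nat.toDigits 10 n = h :: t → h ≠ '0' := by
  induction n using Nat.strong_induction_on with
  | _ n ih =>
    intro h t heq
    rw [pv_toDigits_step] at heq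
    by_cases hlt : n < 10
    · simp only [if_pos hlt] at heq
      obtain ⟨rfl, rfl⟩ : Nat.digitChar n = h ∧ ([] : List Char) = t := by
        constructor <;> [exact (List.cons.injEq _ _ _ _ ▸ heq).1; exact (List.cons.injEq _ _ _ _ ▸ heq).2]
      intro hcontra
      have : n < 10 ∧ n ≠ 0 := ⟨hlt, hn⟩
      interval_cases n <;> simp_all <;> exact absurd hcontra (by decide)
    · simp only [if_neg hlt] at heq
      have hd : n / 10 < n := Nat.div_lt_self (by omega) (by omega)
      have hne : Nat.toDigits 10 (n / 10) ≠ [] := pv_toDigits_ne_nil _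
      obtain ⟨h', t', heq'⟩ : ∃ h' t', Nat.toDigits 10 (n / 10) = h' :: t' := by
        cases hh : Nat.toDigits 10 (n / 10) with
        | nil => exact absurd hh hne
        | cons a b => exact ⟨a, b, rfl⟩
      rw [heq'] at heq
      simp only [List.cons_append] at heq
      have hh : h' = h := (List.cons.injEq _ _ _ _ ▸ heq).1
      subst hh
      exact ih _ hd (by omega) _ _ heq'

theorem pv_val_append_last (ds : List Char) (c : Char) :
    pvVal (ds ++ [c]) = 10 * pvVal ds + (c.toNat - 48) := by
  simp [pvVal, List.foldl_append]

theorem pv_val_toDigits (n : Nat) : pvVal (Nat.toDigits 10 n) = n := by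
  induction n using Nat.strong_induction_on with
  | _ n ih =>
    rw [pv_toDigits_step]
    by_cases h : n < 10
    · simp only [if_pos h]
      simp [pvVal, pv_digitChar_toNat n h]
    · have hlt : n / 10 < n := Nat.div_lt_self (by omega) (by omega)
      simp only [if_neg h]
      rw [pv_val_append_last, ih _ hlt, pv_digitChar_toNat _ (Nat.mod_lt _ (by omega))]
      omega

theorem pv_val_acc_ge (t : List Char) : ∀ a : Nat, a ≤ t.foldl (fun a c => 10 * a + (c.toNat - 48)) a := by
  induction t with
  | nil => intro a; simp
  | cons c t ih =>
    intro a
    calc a ≤ 10 * a + (c.toNat - 48) := by omega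
    _ ≤ _ := ih _

theorem pv_val_pos (h : Char) (t : List Char) (h1 : '0' ≤ h) (h2 : h ≤ '9') (hne : h ≠ '0') :
    1 ≤ pvVal (h :: t) := by
  have hr := pv_digit_toNat_range h h1 h2
  have h48 : h.toNat ≠ 48 := fun hc => hne (pv_char_toNat_inj h '0' (by rw [hc]; decide))
  have : 1 ≤ h.toNat - 48 := by omega
  calc 1 ≤ h.toNat - 48 := this
  _ = 10 * 0 + (h.toNat - 48) := by omega
  _ ≤ _ := pv_val_acc_ge t _

-- uniqueness of the canonical decimal representation
theorem pv_canonical_toDigits (cs : List Char) (hd : ∀ c ∈ cs, '0' ≤ c ∧ c ≤ '9')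
    (hne : cs ≠ []) (hz : cs.head? = some '0' → cs = ['0']) :
    Nat.toDigits 10 (pvVal cs) = cs := by
  induction cs using List.reverseRecOn with
  | nil => exact absurd rfl hne
  | append_singleton ds c ih =>
    have hdc : '0' ≤ c ∧ c ≤ '9' := hd c (by simp)
    have hcr := pv_digit_toNat_range c hdc.1 hdc.2
    cases ds with
    | nil =>
      rw [pv_toDigits_step]
      have hv : pvVal ([] ++ [c]) = c.toNat - 48 := by simp [pvVal]
      simp only [List.nil_append] at *
      rw [hv, if_pos (by omega)]
      rw [pv_digitChar_of_digit c hdc.1 hdc.2]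
    | cons h t =>
      have hh : '0' ≤ h ∧ h ≤ '9' := hd h (by simp)
      have hhne : h ≠ '0' := by
        intro hc
        subst hc
        have := hz (by simp)
        simp at this
      have hval1 : 1 ≤ pvVal (h :: t) := pv_val_pos h t hh.1 hh.2 hhne
      have hvs : pvVal ((h :: t) ++ [c]) = 10 * pvVal (h :: t) + (c.toNat - 48) :=
        pv_val_append_last _ _
      rw [pv_toDigits_step, hvs]
      have hge : ¬ (10 * pvVal (h :: t) + (c.toNat - 48) < 10) := by omega
      rw [if_neg hge]
      have hdiv : (10 * pvVal (h :: t) + (c.toNat - 48)) / 10 = pvVal (h :: t) := by omega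
      have hmod : (10 * pvVal (h :: t) + (c.toNat - 48)) % 10 = c.toNat - 48 := by omega
      rw [hdiv, hmod, pv_digitChar_of_digit c hdc.1 hdc.2]
      rw [ih (fun x hx => hd x (by
        simp only [List.cons_append, List.mem_cons, List.mem_append] at hx ⊢
        tauto)) (by simp) (fun hc => by
        simp only [List.head?_cons, Option.some.injEq] at hc
        exact absurd hc hhne)]

theorem pv_toChars_natCast (j : Nat) : PySem.Int.toChars (j : Int) = Nat.toDigits 10 j := by
  simp [PySem.Int.toChars]

theorem pv_key_toList (j : Nat) : (pvKey j).toList = ['_', 'i', 'd'] ++ Nat.toDigits 10 j := by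
  rw [pvKey, String.toList_append, PySem.Int.toList_toStr, pv_toChars_natCast]
  rfl

theorem pv_key_inj : Function.Injective pvKey := by
  intro a b h
  have h2 := congrArg String.toList h
  rw [pv_key_toList, pv_key_toList] at h2
  have h3 : Nat.toDigits 10 a = Nat.toDigits 10 b := by
    simpa using h2
  calc a = pvVal (Nat.toDigits 10 a) := (pv_val_toDigits a).symm
  _ = pvVal (Nat.toDigits 10 b) := by rw [h3]
  _ = b := pv_val_toDigits b

theorem pv_id_ne_key (j : Nat) : "_id" ≠ pvKey j := by
  intro h
  have h2 := congrArg String.toList h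
  rw [pv_key_toList] at h2
  have : ("_id".toList : List Char) = ['_', 'i', 'd'] := rfl
  rw [this] at h2
  exact pv_toDigits_ne_nil j (List.self_eq_append_right.mp h2)

-- ---------- canonicity of the suffix parser ----------

theorem pv_parseDigits_eq (cs : List Char) : ∀ a : Nat,
    pvParseDigits cs (a : Int) =
      if ∀ c ∈ cs, '0' ≤ c ∧ c ≤ '9' then
        some ((cs.foldl (fun a c => 10 * a + (c.toNat - 48)) a : Nat) : Int)
      else none := by
  induction cs with
  | nil => intro a; simp [pvParseDigits]
  | cons c t ih =>
    intro a
    by_cases hc : '0' ≤ c ∧ c ≤ '9'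
    · have hr := pv_digit_toNat_range c hc.1 hc.2
      have hcast : 10 * (a : Int) + ((c.toNat : Int) - 48) = ((10 * a + (c.toNat - 48) : Nat) : Int) := by
        push_cast [Nat.cast_sub (by omega : 48 ≤ c.toNat)]
        ring
      rw [pvParseDigits, if_pos hc, hcast, ih]
      by_cases ht : ∀ x ∈ t, '0' ≤ x ∧ x ≤ '9'
      · rw [if_pos ht, if_pos (by simpa [hc] using ht)]
        simp [List.foldl_cons]
      · rw [if_neg ht, if_neg (fun hall => ht fun x hx => hall x (List.mem_cons_of_mem _ hx))]
    · rw [pvParseDigits, if_neg hc, if_neg (fun hall => hc (hall c (by simp)))]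

theorem pv_str_get3 (col : String) : PySem.Str.pyGet? col 3 = col.toList[3]? := by
  rw [show (3:Int) = ((3:Nat):Int) from rfl, PySem.Str.pyGet?_natCast]

theorem pv_str_len (col : String) : PySem.Str.len col = (col.toList.length : Int) := by
  simp

theorem pv_slice3 (col : String) : (PySem.Str.slice col (some 3) none).toList = col.toList.drop 3 := by
  simp only [PySem.Str.slice, String.toList_ofList, PySem.Chars.slice_eq_listSlice]
  rw [show (3:Int) = ((3:Nat):Int) from rfl, PySem.List.slice_from _ (by omega)]
  simp

theorem pv_startswith_iff (col p : String) :
    PySem.Str.startswith col p = true ↔ p.toList <+: col.toList := by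
  rw [PySem.Str.startswith, PySem.Chars.startswith_iff]

theorem pv_toDigits_zero : Nat.toDigits 10 0 = ['0'] := rfl

theorem pv_suffixIndex_eq_some_iff (col : String) (v : Int) :
    pvSuffixIndex? col = some v ↔ ∃ j : Nat, v = (j : Int) ∧ col = pvKey j := by
  constructor
  · intro h
    rw [pvSuffixIndex?] at h
    by_cases hsw : PySem.Str.startswith col "_id" = true
    swap
    · rw [if_pos (Or.inl hsw)] at h; exact absurd h (by simp)
    obtain ⟨rest, hcol⟩ := (pv_startswith_iff col "_id").mp hsw
    have hcol : col.toList = ['_', 'i', 'd'] ++ rest := by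
      rw [← hcol]; rfl
    cases rest with
    | nil =>
      rw [if_pos (Or.inr (by rw [pv_str_len, hcol]; rfl))] at h
      exact absurd h (by simp)
    | cons r0 rest' =>
      have hlen : ¬ (¬ PySem.Str.startswith col "_id" = true ∨ PySem.Str.len col = 3) := by
        rw [pv_str_len, hcol]
        push Not
        refine ⟨hsw, ?_⟩
        simp only [List.length_append, List.length_cons]
        omega
      rw [if_neg hlen] at h
      have hget : col.toList[3]? = some r0 := by
        rw [hcol, List.getElem?_append_right (by simp)]
        simp
      by_cases hr0 : r0 = '0'
      · subst hr0
        rw [if_pos (by rw [pv_str_get3, hget])] at h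
        cases rest' with
        | nil =>
          rw [if_pos (by rw [pv_str_len, hcol]; rfl)] at h
          refine ⟨0, by simpa using h.symm, ?_⟩
          apply String.toList_inj.mp
          rw [hcol, pv_key_toList, pv_toDigits_zero]
        | cons r1 rest'' =>
          rw [if_neg (by rw [pv_str_len, hcol]; simp; omega)] at h
          exact absurd h (by simp)
      · rw [if_neg (by rw [pv_str_get3, hget]; simpa using hr0)] at h
        rw [pv_slice3, hcol, show (['_','i','d'] ++ (r0 :: rest')).drop 3 = r0 :: rest' from by simp] at h
        rw [show (0:Int) = ((0:Nat):Int) from rfl, pv_parseDigits_eq] at h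
        by_cases hdig : ∀ c ∈ r0 :: rest', '0' ≤ c ∧ c ≤ '9'
        swap
        · rw [if_neg hdig] at h; exact absurd h (by simp)
        rw [if_pos hdig] at h
        have hv : v = ((pvVal (r0 :: rest') : Nat) : Int) := by
          simpa [pvVal] using h.symm
        refine ⟨pvVal (r0 :: rest'), hv, ?_⟩
        apply String.toList_inj.mp
        rw [hcol, pv_key_toList, pv_canonical_toDigits _ hdig (by simp)
          (fun hc => absurd (by simpa using hc) hr0)]
  · rintro ⟨j, rfl, rfl⟩
    have htl := pv_key_toList j
    have hsw : PySem.Str.startswith (pvKey j) "_id" = true :=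
      (pv_startswith_iff _ _).mpr ⟨Nat.toDigits 10 j, by rw [htl]; rfl⟩
    have hdne := pv_toDigits_ne_nil j
    obtain ⟨d0, drest, hds⟩ : ∃ d0 drest, Nat.toDigits 10 j = d0 :: drest := by
      cases hh : Nat.toDigits 10 j with
      | nil => exact absurd hh hdne
      | cons a b => exact ⟨a, b, rfl⟩
    have hget : (pvKey j).toList[3]? = some d0 := by
      rw [htl, List.getElem?_append_right (by simp), hds]
      simp
    have hcond : ¬ (¬ PySem.Str.startswith (pvKey j) "_id" = true ∨ PySem.Str.len (pvKey j) = 3) := by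
      rw [pv_str_len, htl]
      push Not
      refine ⟨hsw, ?_⟩
      simp only [List.length_append, hds, List.length_cons]
      omega
    rw [pvSuffixIndex?, if_neg hcond]
    by_cases hj : j = 0
    · subst hj
      rw [pv_toDigits_zero] at hds
      have hd0 : d0 = '0' := (List.cons.injEq _ _ _ _ ▸ hds).1.symm
      have hdr : drest = [] := (List.cons.injEq _ _ _ _ ▸ hds).2.symm
      rw [if_pos (by rw [pv_str_get3, hget, hd0]),
        if_pos (by rw [pv_str_len, htl, pv_toDigits_zero]; rfl)]
      rfl
    · have hd0 : d0 ≠ '0' := pv_toDigits_head j hj d0 drest hds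
      rw [if_neg (by rw [pv_str_get3, hget]; simpa using hd0)]
      rw [pv_slice3, htl, show (['_','i','d'] ++ Nat.toDigits 10 j).drop 3 = Nat.toDigits 10 j from by simp]
      rw [show (0:Int) = ((0:Nat):Int) from rfl, pv_parseDigits_eq,
        if_pos (pv_toDigits_all_digit j)]
      have : (Nat.toDigits 10 j).foldl (fun a c => 10 * a + (c.toNat - 48)) 0 = j :=
        pv_val_toDigits j
      rw [this]

-- ---------- A-side characterization ----------

theorem pv_exists_not_mem (columns : List String) : ∃ j, pvKey j ∉ columns := by
  by_contra hc
  push Not at hc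
  have hnodup : ((List.range (columns.length + 1)).map pvKey).Nodup :=
    (List.nodup_range).map pv_key_inj
  have hsub : (List.range (columns.length + 1)).map pvKey ⊆ columns := by
    intro x hx
    obtain ⟨j, _, rfl⟩ := List.mem_map.mp hx
    exact hc j
  have := (List.subperm_of_subset hnodup hsub).length_le
  simp at this

theorem pv_loopA_run (columns : List String) (hex : ∃ j, pvKey j ∉ columns) :
    ∀ (fuel j : Nat), j ≤ Nat.find hex → Nat.find hex - j < fuel →
      pvLoopA columns fuel (pvKey j) ((j : Int) + 1) = pvKey (Nat.find hex) := by
  intro fuel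
  induction fuel with
  | zero => intro j h1 h2; omega
  | succ fuel ih =>
    intro j h1 h2
    rw [pvLoopA]
    by_cases hj : j = Nat.find hex
    · subst hj
      have : pvKey (Nat.find hex) ∉ columns := Nat.find_spec hex
      rw [if_neg (by simpa [List.contains_iff_mem] using this)]
    · have hjlt : j < Nat.find hex := by omega
      have hmem : pvKey j ∈ columns := by
        have := Nat.find_min hex hjlt
        simpa using this
      rw [if_pos (by simpa [List.contains_iff_mem] using hmem)]
      have hkey : "_id" ++ PySem.Int.toStr ((j : Int) + 1) = pvKey (j + 1) := by
        rw [pvKey]; push_cast; ring_nf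
      have hi : ((j : Int) + 1) + 1 = ((j + 1 : Nat) : Int) + 1 := by push_cast; ring
      rw [hkey, hi]
      exact ih (j + 1) (by omega) (by omega)

theorem pv_find_le (columns : List String) (hex : ∃ j, pvKey j ∉ columns)
    (hid : "_id" ∈ columns) : Nat.find hex ≤ columns.length := by
  have hnodup : ("_id" :: (List.range (Nat.find hex)).map pvKey).Nodup := by
    refine List.nodup_cons.mpr ⟨?_, (List.nodup_range).map pv_key_inj⟩
    intro hmem
    obtain ⟨j, _, hj⟩ := List.mem_map.mp hmem
    exact pv_id_ne_key j hj.symm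
  have hsub : ("_id" :: (List.range (Nat.find hex)).map pvKey) ⊆ columns := by
    intro x hx
    rcases List.mem_cons.mp hx with rfl | hx
    · exact hid
    · obtain ⟨j, hj, rfl⟩ := List.mem_map.mp hx
      have := Nat.find_min hex (List.mem_range.mp hj)
      simpa using this
  have hlen := (List.subperm_of_subset hnodup hsub).length_le
  simp only [List.length_cons, List.length_map, List.length_range] at hlen
  omega

theorem pv_A_char (columns : List String) (hex : ∃ j, pvKey j ∉ columns) :
    get_name_for_key columns =
      if "_id" ∈ columns then pvKey (Nat.find hex) else "_id" := by
  rw [get_name_for_key, pvLoopA]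
  by_cases hid : "_id" ∈ columns
  · rw [if_pos (by simpa [List.contains_iff_mem] using hid), if_pos hid]
    have h0 : ("_id" ++ PySem.Int.toStr 0 : String) = pvKey 0 := rfl
    have h1 : (0 : Int) + 1 = ((0 : Nat) : Int) + 1 := by norm_num
    rw [h0, h1]
    exact pv_loopA_run columns hex _ 0 (Nat.zero_le _)
      (by have := pv_find_le columns hex hid; omega)
  · rw [if_neg (by simpa [List.contains_iff_mem] using hid), if_neg hid]

-- ---------- B-side characterization ----------

theorem pv_foldl_match (cols : List String) : ∀ s : PySem.Set Int,
    cols.foldl (fun s col =>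
      match pvSuffixIndex? col with
      | some j => PySem.Set.add s j
      | none => s) s = (cols.filterMap pvSuffixIndex?).foldl PySem.Set.add s := by
  induction cols with
  | nil => intro s; rfl
  | cons c t ih =>
    intro s
    cases h : pvSuffixIndex? c <;> simp [h, ih]

theorem pv_mexWalk_spec (l : List Int) (hl : l.Pairwise (· < ·)) :
    ∀ j : Int, (∀ v ∈ l, j ≤ v) →
      j ≤ pvMexWalk l j ∧ pvMexWalk l j ∉ l ∧
        (∀ t : Int, j ≤ t → t < pvMexWalk l j → t ∈ l) := by
  induction l with
  | nil => intro j _; refine ⟨le_refl j, by simp [pvMexWalk], ?_⟩; intro t h1 h2; simp [pvMexWalk] at h2; omega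
  | cons v rest ih =>
    intro j hge
    have hvrest : ∀ w ∈ rest, v < w := by
      intro w hw; exact (List.pairwise_cons.mp hl).1 w hw
    by_cases hv : v = j
    · subst hv
      rw [pvMexWalk, if_pos rfl]
      have hrest := ih (List.pairwise_cons.mp hl).2 (v + 1) (fun w hw => by have := hvrest w hw; omega)
      obtain ⟨h1, h2, h3⟩ := hrest
      refine ⟨by omega, ?_, ?_⟩
      · simp only [List.mem_cons]
        rintro (heq | hmem)
        · omega
        · exact h2 hmem
      · intro t ht1 ht2
        by_cases htv : t = v
        · simp [htv]
        · exact List.mem_cons_of_mem _ (h3 t (by omega) ht2)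
    · have hjv : j < v := by have := hge v (by simp); omega
      rw [pvMexWalk, if_neg hv, if_pos (by omega)]
      refine ⟨le_refl j, ?_, ?_⟩
      · simp only [List.mem_cons]
        rintro (heq | hmem)
        · omega
        · have := hvrest j hmem; omega
      · intro t h1 h2; omega

theorem pv_B_char (columns : List String) (hex : ∃ j, pvKey j ∉ columns) :
    get_name_for_key_alt columns =
      if "_id" ∈ columns then pvKey (Nat.find hex) else "_id" := by
  rw [get_name_for_key_alt]
  by_cases hid : "_id" ∈ columns
  swap
  · rw [if_pos (by simpa [List.contains_iff_mem] using hid), if_neg hid]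
  rw [if_neg (by simpa [List.contains_iff_mem] using hid), if_pos hid]
  show "_id" ++ PySem.Int.toStr (pvMexWalk (PySem.List.sorted
      (columns.foldl (fun s col =>
        match pvSuffixIndex? col with
        | some j => PySem.Set.add s j
        | none => s) PySem.Set.empty) (fun x => x) false) 0) = pvKey (Nat.find hex)
  have hused : columns.foldl (fun s col =>
      match pvSuffixIndex? col with
      | some j => PySem.Set.add s j
      | none => s) PySem.Set.empty = PySem.Set.ofList (columns.filterMap pvSuffixIndex?) := by
    rw [pv_foldl_match, PySem.Set.ofList_eq_foldl]; rfl
  rw [hused]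
  have hpair : (PySem.List.sorted (PySem.Set.ofList (columns.filterMap pvSuffixIndex?))
      (fun x => x) false).Pairwise (· < ·) :=
    PySem.List.sorted_ofList_pairwise_lt _
  have hmemsrt : ∀ x : Int, x ∈ PySem.List.sorted (PySem.Set.ofList (columns.filterMap pvSuffixIndex?))
      (fun x => x) false ↔ ∃ j : Nat, x = (j : Int) ∧ pvKey j ∈ columns := by
    intro x
    rw [PySem.List.mem_sorted, PySem.Set.mem_ofList, List.mem_filterMap]
    constructor
    · rintro ⟨col, hcolmem, hcol⟩
      obtain ⟨j, rfl, rfl⟩ := (pv_suffixIndex_eq_some_iff col x).mp hcol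
      exact ⟨j, rfl, hcolmem⟩
    · rintro ⟨j, rfl, hmem⟩
      exact ⟨pvKey j, hmem, (pv_suffixIndex_eq_some_iff _ _).mpr ⟨j, rfl, rfl⟩⟩
  have hge : ∀ v ∈ PySem.List.sorted (PySem.Set.ofList (columns.filterMap pvSuffixIndex?))
      (fun x => x) false, (0 : Int) ≤ v := by
    intro v hv
    obtain ⟨j, rfl, -⟩ := (hmemsrt v).mp hv
    positivity
  obtain ⟨hge0, hnot, hall⟩ := pv_mexWalk_spec _ hpair 0 hge
  set r := pvMexWalk (PySem.List.sorted (PySem.Set.ofList (columns.filterMap pvSuffixIndex?))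
    (fun x => x) false) 0 with hr
  have hrN : r = ((r.toNat : Nat) : Int) := (Int.toNat_of_nonneg hge0).symm
  have h1 : pvKey r.toNat ∉ columns := fun hmem => hnot ((hmemsrt r).mpr ⟨r.toNat, hrN, hmem⟩)
  have hle : Nat.find hex ≤ r.toNat := Nat.find_min' hex h1
  have hge2 : r.toNat ≤ Nat.find hex := by
    by_contra hc
    push Not at hc
    have hlt : ((Nat.find hex : Nat) : Int) < r := by omega
    have hmem := hall ((Nat.find hex : Nat) : Int) (by positivity) hlt
    obtain ⟨j, hj, hjmem⟩ := (hmemsrt _).mp hmem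
    have : j = Nat.find hex := by exact_mod_cast hj.symm
    subst this
    exact (Nat.find_spec hex) hjmem
  have : r = ((Nat.find hex : Nat) : Int) := by omega
  rw [this]
  rfl

-- ===== VERDICT (by name: the statement is the Claim_ definition above) =====
theorem get_name_for_key_spec : Claim_equal_get_name_for_key := by
  intro columns _
  unfold Spec_get_name_for_key
  have hex := pv_exists_not_mem columns
  rw [pv_A_char columns hex, pv_B_char columns hex]
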